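-- pv_equiv track=rewrite | github.com/davidassef/PokeAPI | backend/tests/test_endpoint_coverage.py | _paths_match
-- ===== SOURCE A (Python) =====
-- def _paths_match(expected: str, actual: str) -> bool:
--     """Verifica se caminhos com parâmetros coincidem."""
--     expected_parts = expected.split('/')
--     actual_parts = actual.split('/')
--
--     if len(expected_parts) != len(actual_parts):
--         return False
--
--     for exp_part, act_part in zip(expected_parts, actual_parts):
--         if exp_part.startswith('{') and exp_part.endswith('}'):
--             continue  # Parâmetro, aceita qualquer valor
--         if exp_part != act_part:
--             return False
--
--     return True
-- ===== SOURCE B (Python) =====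
-- def _paths_match(expected: str, actual: str) -> bool:
--     """Single forward pass: peel one '/'-segment at a time from both paths with
--     str.partition, failing as soon as the segment structure or a literal
--     segment disagrees; no split lists, no zip."""
--     while True:
--         e_head, e_sep, expected = expected.partition('/')
--         a_head, a_sep, actual = actual.partition('/')
--         if e_sep != a_sep:
--             return False  # one path has more segments than the other
--         if not (e_head.startswith('{') and e_head.endswith('}')) and e_head != a_head:
--             return False
--         if not e_sep:
--             return True
-- ===== Notes on version B (the rewrite author's own statement) =====
-- stated objective: alternative
-- what changed: Instead of splitting both paths into segment lists, comparing lengths and zipping, B peels one '/'-segment at a time from both strings with str.partition in a single loop, returning False the moment the separator structure or a non-placeholder segment disagrees.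
import Mathlib
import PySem

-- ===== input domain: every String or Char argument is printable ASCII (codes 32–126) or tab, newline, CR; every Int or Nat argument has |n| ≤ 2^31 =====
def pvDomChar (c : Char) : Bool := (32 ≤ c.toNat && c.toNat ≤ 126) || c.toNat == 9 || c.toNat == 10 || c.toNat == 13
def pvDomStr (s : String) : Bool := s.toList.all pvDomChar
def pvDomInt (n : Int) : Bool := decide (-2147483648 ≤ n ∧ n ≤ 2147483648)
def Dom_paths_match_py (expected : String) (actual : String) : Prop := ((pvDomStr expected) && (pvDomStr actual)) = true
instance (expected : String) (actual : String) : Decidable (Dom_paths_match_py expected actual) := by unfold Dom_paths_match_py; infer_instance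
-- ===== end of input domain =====

-- B replaces A's split-into-lists + length check + zip loop by a single partition-style
-- loop that peels one '/'-segment at a time from both strings (objective: alternative).

-- ===== PORT A =====
-- the for-loop over zip(expected_parts, actual_parts), early return False on a mismatch
def pyZipAll : List (List Char × List Char) → Bool
  | [] => true
  | (e, a) :: rest =>
    if PySem.Chars.startswith e ['{'] && PySem.Chars.endswith e ['}'] then pyZipAll rest
    else if e ≠ a then false else pyZipAll rest

def paths_match_py (expected : String) (actual : String) : Bool :=
  let expected_parts := PySem.Chars.splitOn expected.toList ['/']
  let actual_parts := PySem.Chars.splitOn actual.toList ['/']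
  if expected_parts.length ≠ actual_parts.length then false
  else pyZipAll (expected_parts.zip actual_parts)

-- ===== PORT B =====
-- s.partition('/') restricted to what B uses: (head before first '/', rest after it if any)
def altPartition : List Char → List Char × Option (List Char)
  | [] => ([], none)
  | c :: rest =>
    if c = '/' then ([], some rest)
    else
      let (h, t) := altPartition rest
      (c :: h, t)

theorem altPartition_some_length : ∀ (cs h r : List Char), altPartition cs = (h, some r) → r.length < cs.length := by
  intro cs
  induction cs with
  | nil => intro h r hc; simp [altPartition] at hc
  | cons c rest ih =>
    intro h r hc
    by_cases hcs : c = '/'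
    · simp [altPartition, hcs] at hc
      simp [hc.2]
    · simp only [altPartition, if_neg hcs] at hc
      cases he : altPartition rest with
      | mk h' t' =>
        rw [he] at hc
        cases t' with
        | none => simp at hc
        | some r' =>
          simp at hc
          have := ih h' r' he
          rw [← hc.2]
          simp
          omega

def segIsParam (s : List Char) : Bool :=
  PySem.Chars.startswith s ['{'] && PySem.Chars.endswith s ['}']

def altLoop (e a : List Char) : Bool :=
  match he : altPartition e, altPartition a with
  | (eh, some er), (ah, some ar) =>
    if !(segIsParam eh) && eh ≠ ah then false else altLoop er ar
  | (eh, none), (ah, none) =>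
    if !(segIsParam eh) && eh ≠ ah then false else true
  | _, _ => false
termination_by e.length
decreasing_by exact altPartition_some_length e _ _ he

def paths_match_py_alt (expected : String) (actual : String) : Bool :=
  altLoop expected.toList actual.toList

-- ===== PRECONDITION & SPEC =====
def Spec_paths_match_py (expected : String) (actual : String) (out : Bool) : Prop := out = paths_match_py_alt expected actual
instance (expected : String) (actual : String) (out : Bool) : Decidable (Spec_paths_match_py expected actual out) := by unfold Spec_paths_match_py; infer_instance

-- ===== CLAIM (what is proved, stated in full; the proofs are below) =====
def Claim_equal_paths_match_py : Prop := ∀ (expected : String) (actual : String), Dom_paths_match_py expected actual → Spec_paths_match_py expected actual (paths_match_py expected actual)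

-- ===== LEMMAS AND PROOFS =====

-- the first '/'-segment and the remaining segments of cs, structurally
def segsF : List Char → List Char × List (List Char)
  | [] => ([], [])
  | c :: rest =>
    let (h, t) := segsF rest
    if c = '/' then ([], h :: t) else (c :: h, t)

theorem splitOn_go_inv : ∀ (fuel : Nat) (l cur : List Char) (acc : List (List Char)),
    l.length < fuel →
    PySem.Chars.splitOn.go ['/'] fuel l cur acc
      = acc.reverse ++ (cur.reverse ++ (segsF l).1) :: (segsF l).2 := by
  intro fuel
  induction fuel with
  | zero => intro l cur acc h; omega
  | succ f ih =>
    intro l cur acc h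
    cases l with
    | nil =>
      rw [PySem.Chars.splitOn.go]
      simp [segsF]
      omega
    | cons c rest =>
      rw [PySem.Chars.splitOn.go]
      by_cases hc : c = '/'
      · subst hc
        rw [if_pos (by simp [List.isPrefixOf])]
        rw [ih _ [] (cur.reverse :: acc) (by simp at h ⊢; omega)]
        simp [segsF]
      · rw [if_neg (by simp [List.isPrefixOf]; exact fun hcc => absurd hcc.symm hc)]
        rw [ih rest (c :: cur) acc (by simp at h ⊢; omega)]
        cases hsf : segsF rest with
        | mk sh st => simp [segsF, hsf, hc]

theorem splitOn_slash (cs : List Char) :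
    PySem.Chars.splitOn cs ['/'] = (segsF cs).1 :: (segsF cs).2 := by
  unfold PySem.Chars.splitOn
  rw [splitOn_go_inv (cs.length + 1) cs [] [] (by omega)]
  simp

theorem segsF_of_partition_none (cs : List Char) : ∀ (h : List Char), altPartition cs = (h, none) →
    segsF cs = (h, []) := by
  induction cs with
  | nil => intro h hc; simp [altPartition] at hc; simp [segsF, hc]
  | cons c rest ih =>
    intro h hc
    by_cases hcs : c = '/'
    · simp [altPartition, hcs] at hc
    · simp only [altPartition, if_neg hcs] at hc
      cases he : altPartition rest with
      | mk h' t' =>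
        rw [he] at hc
        cases t' with
        | none =>
          simp at hc
          have := ih h' he
          simp [segsF, this, hcs, ← hc]
        | some r' => simp at hc

theorem segsF_of_partition_some (cs : List Char) : ∀ (h r : List Char), altPartition cs = (h, some r) →
    segsF cs = (h, (segsF r).1 :: (segsF r).2) := by
  induction cs with
  | nil => intro h r hc; simp [altPartition] at hc
  | cons c rest ih =>
    intro h r hc
    by_cases hcs : c = '/'
    · simp [altPartition, hcs] at hc
      simp [segsF, hcs, ← hc.1, ← hc.2]
    · simp only [altPartition, if_neg hcs] at hc
      cases he : altPartition rest with
      | mk h' t' =>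
        rw [he] at hc
        cases t' with
        | none => simp at hc
        | some r' =>
          simp at hc
          have := ih h' r' he
          simp [segsF, this, hcs, ← hc.1, ← hc.2]

theorem altLoop_some_some (e a eh er ah ar : List Char)
    (hpe : altPartition e = (eh, some er)) (hpa : altPartition a = (ah, some ar)) :
    altLoop e a = if !(segIsParam eh) && eh ≠ ah then false else altLoop er ar := by
  rw [altLoop.eq_def]
  split <;> simp_all
  rename_i hW
  intro _
  exact ((hW eh er ah ar rfl rfl rfl) rfl).elim

theorem altLoop_none_none (e a eh ah : List Char)
    (hpe : altPartition e = (eh, none)) (hpa : altPartition a = (ah, none)) :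
    altLoop e a = if !(segIsParam eh) && eh ≠ ah then false else true := by
  rw [altLoop.eq_def]
  split <;> simp_all

theorem altLoop_mismatch (e a : List Char)
    (hss : ∀ (eh er ah ar : List Char), altPartition e = (eh, some er) → altPartition a = (ah, some ar) → False)
    (hnn : ∀ (eh ah : List Char), altPartition e = (eh, none) → altPartition a = (ah, none) → False) :
    altLoop e a = false := by
  rw [altLoop.eq_def]
  split
  · rename_i eh er ah ar hpe hpa
    exact absurd (hss eh er ah ar hpe hpa) (by simp)
  · rename_i eh ah hpe hpa
    exact absurd (hnn eh ah hpe hpa) (by simp)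
  · rfl

theorem main_lemma : ∀ (e a : List Char),
    (if ((segsF e).1 :: (segsF e).2).length ≠ ((segsF a).1 :: (segsF a).2).length then false
     else pyZipAll (((segsF e).1 :: (segsF e).2).zip ((segsF a).1 :: (segsF a).2))) = altLoop e a := by
  intro e a
  induction e, a using altLoop.induct with
  | case1 e a eh er ah ar hpe hpa hcond =>
    rw [altLoop_some_some e a eh er ah ar hpe hpa, if_pos hcond]
    rw [segsF_of_partition_some e eh er hpe, segsF_of_partition_some a ah ar hpa]
    simp only [Bool.and_eq_true, Bool.not_eq_true', decide_eq_true_eq, segIsParam,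
      Bool.and_eq_false_iff] at hcond
    rcases hcond with ⟨hsw, hne⟩
    cases hsw with
    | inl h => simp [pyZipAll, h, hne]
    | inr h => simp [pyZipAll, h, hne]
  | case2 e a eh er ah ar hpe hpa hcond ih =>
    rw [altLoop_some_some e a eh er ah ar hpe hpa, if_neg hcond, ← ih]
    rw [segsF_of_partition_some e eh er hpe, segsF_of_partition_some a ah ar hpa]
    simp only [Bool.and_eq_true, Bool.not_eq_true', not_and, decide_eq_true_eq, segIsParam] at hcond
    by_cases hp : (PySem.Chars.startswith eh ['{'] && PySem.Chars.endswith eh ['}']) = true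
    · simp [pyZipAll, hp]
    · have heq : eh = ah := by
        by_contra hne
        exact (hcond (by simp_all)) hne
      simp [pyZipAll, heq]
  | case3 e a eh ah hpe hpa hcond =>
    rw [altLoop_none_none e a eh ah hpe hpa, if_pos hcond]
    rw [segsF_of_partition_none e eh hpe, segsF_of_partition_none a ah hpa]
    simp only [Bool.and_eq_true, Bool.not_eq_true', decide_eq_true_eq, segIsParam,
      Bool.and_eq_false_iff] at hcond
    rcases hcond with ⟨hsw, hne⟩
    cases hsw with
    | inl h => simp [pyZipAll, h, hne]
    | inr h => simp [pyZipAll, h, hne]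
  | case4 e a eh ah hpe hpa hcond =>
    rw [altLoop_none_none e a eh ah hpe hpa, if_neg hcond]
    rw [segsF_of_partition_none e eh hpe, segsF_of_partition_none a ah hpa]
    simp only [Bool.and_eq_true, Bool.not_eq_true', not_and, decide_eq_true_eq, segIsParam] at hcond
    by_cases hp : (PySem.Chars.startswith eh ['{'] && PySem.Chars.endswith eh ['}']) = true
    · simp [pyZipAll, hp]
    · have heq : eh = ah := by
        by_contra hne
        exact (hcond (by simp_all)) hne
      simp [pyZipAll, heq]
  | case5 e a hss hnn =>
    rw [altLoop_mismatch e a hss hnn]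
    cases hpe : altPartition e with
    | mk eh et =>
      cases hpa : altPartition a with
      | mk ah at' =>
        cases et with
        | none =>
          cases at' with
          | none => exact absurd (hnn eh ah hpe hpa) (by simp)
          | some ar =>
            rw [segsF_of_partition_none e eh hpe, segsF_of_partition_some a ah ar hpa]
            simp
        | some er =>
          cases at' with
          | none =>
            rw [segsF_of_partition_some e eh er hpe, segsF_of_partition_none a ah hpa]
            simp
          | some ar => exact absurd (hss eh er ah ar hpe hpa) (by simp)

-- ===== VERDICT (by name: the statement is the Claim_ definition above) =====
theorem paths_match_py_spec : Claim_equal_paths_match_py := by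
  intro expected actual _
  unfold Spec_paths_match_py paths_match_py paths_match_py_alt
  simp only [splitOn_slash]
  exact main_lemma expected.toList actual.toList
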